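-- pv_equiv track=rewrite | github.com/soliv36/SDR-BPSK-COMM | SDR_COMM/tx_rx.py | find_start_index
-- ===== SOURCE A (Python) =====
-- def find_start_index(samples):
--     start_data = [1, 1, 1, 0, 0, 0, 1, 1, 1]
--     inverted_check = [1, 1, 1, 1, 1, 1, 1, 1, 1]
--
--     start_data_length = 9
--     samples_length = len(samples)
--     num_starting_positions = samples_length - start_data_length + 1
--
--     for index in range(num_starting_positions):
--
--         samples_slice = samples[index:index + start_data_length] #Take a chunk of samples to compare
--         if samples_slice == start_data:
--             #Start sequence found
--             return (index + start_data_length)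
--
--         elif samples_slice == inverted_check:
--             #Samples was likely inverted
--             return -2
--
--         elif samples_slice == [0, 1, 0, 1, 0, 1, 0, 1, 0]:
--             #The stop signal is likely being sent
--             if samples[index: index + 18] == [0, 1, 0, 1, 0, 1, 0, 1, 0, 1, 0, 1, 0, 1, 0, 1, 0, 1]:
--                 #Stop signal is definitely being sent
--                 return -3
--
--     return -1 #start data not found
-- ===== SOURCE B (Python) =====
-- def find_start_index(samples):
--     start_pat = [1, 1, 1, 0, 0, 0, 1, 1, 1]
--     inv_pat = [1, 1, 1, 1, 1, 1, 1, 1, 1]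
--     stop_pat = [0, 1, 0, 1, 0, 1, 0, 1, 0, 1, 0, 1, 0, 1, 0, 1, 0, 1]
--
--     def first_at(pat):
--         m = len(pat)
--         for i in range(len(samples) - m + 1):
--             if samples[i:i + m] == pat:
--                 return i
--         return None
--
--     i = first_at(start_pat)
--     j = first_at(inv_pat)
--     k = first_at(stop_pat)
--     found = [x for x in (i, j, k) if x is not None]
--     if not found:
--         return -1
--     best = min(found)
--     if best == i:
--         return best + 9
--     if best == j:
--         return -2
--     return -3
-- ===== Notes on version B (the rewrite author's own statement) =====
-- stated objective: alternative
-- what changed: A's single scan with ordered branch tests per window is replaced by three independent first-occurrence searches (start 9-pattern, inverted 9-pattern, full 18-long stop pattern) whose earliest hit determines the result; the stop search matches the 18-pattern directly, subsuming A's two-stage stop-9-then-18 check.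
import Mathlib
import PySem

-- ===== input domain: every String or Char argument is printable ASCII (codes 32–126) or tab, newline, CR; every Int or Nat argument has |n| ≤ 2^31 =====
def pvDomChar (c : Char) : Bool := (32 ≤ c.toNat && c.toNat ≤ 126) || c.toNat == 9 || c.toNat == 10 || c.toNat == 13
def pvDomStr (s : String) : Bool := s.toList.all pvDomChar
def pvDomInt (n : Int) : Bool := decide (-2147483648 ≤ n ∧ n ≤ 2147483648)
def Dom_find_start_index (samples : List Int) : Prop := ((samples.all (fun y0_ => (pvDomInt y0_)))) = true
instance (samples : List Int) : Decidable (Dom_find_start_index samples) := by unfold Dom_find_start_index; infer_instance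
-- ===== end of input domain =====

-- B replaces A's single ordered-branch scan by three independent first-occurrence searches combined by earliest index (alternative decomposition, same cost).

-- ===== PORT A =====
-- the for-loop over range(num_starting_positions) with early returns
def pvLoopA (samples : List Int) : List Int → Int
  | [] => -1
  | index :: rest =>
    let samples_slice := PySem.List.slice samples (some index) (some (index + 9))
    if samples_slice = [1, 1, 1, 0, 0, 0, 1, 1, 1] then index + 9
    else if samples_slice = [1, 1, 1, 1, 1, 1, 1, 1, 1] then -2
    else if samples_slice = [0, 1, 0, 1, 0, 1, 0, 1, 0] then
      (if PySem.List.slice samples (some index) (some (index + 18)) =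
          [0, 1, 0, 1, 0, 1, 0, 1, 0, 1, 0, 1, 0, 1, 0, 1, 0, 1] then -3
       else pvLoopA samples rest)
    else pvLoopA samples rest

def find_start_index (samples : List Int) : Int :=
  pvLoopA samples (PySem.List.pyRange 0 (PySem.List.len samples - 9 + 1) 1)

-- ===== PORT B =====
-- first_at's for-loop with early return
def pvFirstAtLoop (samples pat : List Int) : List Int → Option Int
  | [] => none
  | i :: rest =>
    if PySem.List.slice samples (some i) (some (i + PySem.List.len pat)) = pat then some i
    else pvFirstAtLoop samples pat rest

def pvFirstAt (samples pat : List Int) : Option Int :=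
  pvFirstAtLoop samples pat
    (PySem.List.pyRange 0 (PySem.List.len samples - PySem.List.len pat + 1) 1)

def find_start_index_alt (samples : List Int) : Int :=
  let i := pvFirstAt samples [1, 1, 1, 0, 0, 0, 1, 1, 1]
  let j := pvFirstAt samples [1, 1, 1, 1, 1, 1, 1, 1, 1]
  let k := pvFirstAt samples [0, 1, 0, 1, 0, 1, 0, 1, 0, 1, 0, 1, 0, 1, 0, 1, 0, 1]
  let found := List.filterMap id [i, j, k]
  match PySem.List.min? found (fun x => x) with
  | none => -1
  | some best => if some best = i then best + 9 else if some best = j then -2 else -3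

-- ===== PRECONDITION & SPEC =====
def Spec_find_start_index (samples : List Int) (out : Int) : Prop := out = find_start_index_alt samples
instance (samples : List Int) (out : Int) : Decidable (Spec_find_start_index samples out) := by unfold Spec_find_start_index; infer_instance

-- ===== CLAIM (what is proved, stated in full; the proofs are below) =====
def Claim_equal_find_start_index : Prop := ∀ (samples : List Int), Dom_find_start_index samples → Spec_find_start_index samples (find_start_index samples)

-- ===== LEMMAS AND PROOFS =====


-- pattern abbreviations (proof-side)
def pvStart : List Int := [1, 1, 1, 0, 0, 0, 1, 1, 1]
def pvInv : List Int := [1, 1, 1, 1, 1, 1, 1, 1, 1]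
def pvStop9 : List Int := [0, 1, 0, 1, 0, 1, 0, 1, 0]
def pvStop18 : List Int := [0, 1, 0, 1, 0, 1, 0, 1, 0, 1, 0, 1, 0, 1, 0, 1, 0, 1]

-- B's combination step, as a function of the three first-occurrence indices
def pvCombine (i j k : Option Int) : Int :=
  match PySem.List.min? (List.filterMap id [i, j, k]) (fun x => x) with
  | none => -1
  | some best => if some best = i then best + 9 else if some best = j then -2 else -3

lemma pvAlt_eq (s : List Int) :
    find_start_index_alt s =
      pvCombine (pvFirstAt s pvStart) (pvFirstAt s pvInv) (pvFirstAt s pvStop18) := rfl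

lemma pvFirstAtLoop_mem (s p : List Int) :
    ∀ L x, pvFirstAtLoop s p L = some x → x ∈ L := by
  intro L
  induction L with
  | nil => intro x h; simp [pvFirstAtLoop] at h
  | cons i rest ih =>
    intro x h
    simp only [pvFirstAtLoop] at h
    split at h
    · simp at h; simp [h]
    · exact List.mem_cons_of_mem _ (ih x h)

lemma pvSlice_take9 (s : List Int) (i : Int) (h : 0 ≤ i) :
    PySem.List.slice s (some i) (some (i + 9)) =
      (PySem.List.slice s (some i) (some (i + 18))).take 9 := by
  rw [PySem.List.slice_toNat s h (by omega), PySem.List.slice_toNat s h (by omega), List.take_take]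
  congr 1
  omega

lemma pvStop18_imp_stop9 (s : List Int) (i : Int) (h : 0 ≤ i)
    (h18 : PySem.List.slice s (some i) (some (i + 18)) = pvStop18) :
    PySem.List.slice s (some i) (some (i + 9)) = pvStop9 := by
  rw [pvSlice_take9 s i h, h18]
  decide

lemma pvNoMatch (s : List Int) (i : Int) (h : 0 ≤ i) (hi : (s.length : Int) - 18 < i) :
    PySem.List.slice s (some i) (some (i + 18)) ≠ pvStop18 := by
  intro hEq
  have hlen := congrArg List.length hEq
  rw [PySem.List.slice_toNat s h (by omega)] at hlen
  simp [pvStop18] at hlen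
  have : (i.toNat : Int) = i := Int.toNat_of_nonneg h
  omega

lemma pvFirstAtLoop_none (s p : List Int) :
    ∀ L, (∀ i ∈ L, PySem.List.slice s (some i) (some (i + PySem.List.len p)) ≠ p) →
      pvFirstAtLoop s p L = none := by
  intro L
  induction L with
  | nil => intro _; rfl
  | cons i rest ih =>
    intro h
    simp only [pvFirstAtLoop]
    rw [if_neg (h i List.mem_cons_self)]
    exact ih (fun j hj => h j (List.mem_cons_of_mem _ hj))

lemma pvFirstAtLoop_append_none (s p : List Int) (L1 L2 : List Int)
    (h : ∀ i ∈ L2, PySem.List.slice s (some i) (some (i + PySem.List.len p)) ≠ p) :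
    pvFirstAtLoop s p (L1 ++ L2) = pvFirstAtLoop s p L1 := by
  induction L1 with
  | nil => simp only [List.nil_append]; rw [pvFirstAtLoop_none s p L2 h]; rfl
  | cons i rest ih =>
    simp only [List.cons_append, pvFirstAtLoop]
    rw [ih]

lemma pvLenStop18 : PySem.List.len pvStop18 = 18 := by decide

-- B's stop-pattern search over its own (shorter) range equals the search over A's range:
-- beyond length-18 windows the 18-long pattern can never match
lemma pvStopRange (s : List Int) :
    pvFirstAt s pvStop18 =
      pvFirstAtLoop s pvStop18 (PySem.List.pyRange 0 ((s.length : Int) - 8) 1) := by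
  have hr : PySem.List.len s - PySem.List.len pvStop18 + 1 = (s.length : Int) - 17 := by
    rw [pvLenStop18]; simp [PySem.List.len_eq]; ring
  unfold pvFirstAt
  rw [hr]
  by_cases h8 : (s.length : Int) - 8 ≤ 0
  · rw [PySem.List.pyRange_one_eq_nil (by omega : (s.length : Int) - 17 ≤ 0),
      PySem.List.pyRange_one_eq_nil h8]
  · by_cases h17 : (s.length : Int) - 17 ≤ 0
    · rw [pvFirstAtLoop_none s pvStop18 (PySem.List.pyRange 0 ((s.length : Int) - 8) 1)
          (fun i hi => by
            rw [PySem.List.mem_pyRange_one] at hi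
            rw [pvLenStop18]
            exact pvNoMatch s i hi.1 (by omega)),
        PySem.List.pyRange_one_eq_nil h17]
      rfl
    · rw [PySem.List.pyRange_one_append 0 ((s.length : Int) - 17) ((s.length : Int) - 8)
        (by omega) (by omega)]
      rw [pvFirstAtLoop_append_none s pvStop18 _ _ (fun i hi => by
        rw [PySem.List.mem_pyRange_one] at hi
        rw [pvLenStop18]
        exact pvNoMatch s i (by omega) (by omega))]

lemma pvMinEq (t : List Int) (m : Int) (hm : m ∈ t)
    (huniq : ∀ y ∈ t, y = m ∨ m < y) :
    PySem.List.min? t (fun x => x) = some m := by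
  obtain ⟨m', hm'⟩ : ∃ m', PySem.List.min? t (fun x => x) = some m' := by
    cases h : PySem.List.min? t (fun x => x) with
    | none =>
      rw [PySem.List.min?_eq_none_iff] at h
      subst h; simp at hm
    | some v => exact ⟨v, rfl⟩
  have hmem := PySem.List.min?_mem hm'
  have hle : m' ≤ m := PySem.List.min?_isMin hm' m hm
  rcases huniq m' hmem with h | h
  · rw [hm', h]
  · omega

-- membership in the filtered list of the three optional indices
lemma pvMemFilterMap3 (o1 o2 o3 : Option Int) (x : Int) :
    x ∈ List.filterMap id [o1, o2, o3] ↔ (o1 = some x ∨ o2 = some x ∨ o3 = some x) := by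
  cases o1 <;> cases o2 <;> cases o3 <;> simp [List.filterMap] <;> tauto

-- the three shapes of B's combination when the earliest hit is known
lemma pvCombine_start (i : Int) (j k : Option Int)
    (hj : ∀ x, j = some x → i < x) (hk : ∀ x, k = some x → i < x) :
    pvCombine (some i) j k = i + 9 := by
  unfold pvCombine
  have hmin : PySem.List.min? (List.filterMap id [some i, j, k]) (fun x => x) = some i := by
    apply pvMinEq
    · exact (pvMemFilterMap3 _ _ _ i).mpr (Or.inl rfl)
    · intro y hy
      rcases (pvMemFilterMap3 _ _ _ y).mp hy with h | h | h
      · exact Or.inl (Option.some.inj h).symm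
      · exact Or.inr (hj y h)
      · exact Or.inr (hk y h)
  rw [hmin]
  show (if some i = some i then i + 9 else if some i = j then -2 else -3) = i + 9
  rw [if_pos rfl]

lemma pvCombine_inv (i : Int) (ir k : Option Int)
    (hir : ∀ x, ir = some x → i < x) (hk : ∀ x, k = some x → i < x) :
    pvCombine ir (some i) k = -2 := by
  unfold pvCombine
  have hmin : PySem.List.min? (List.filterMap id [ir, some i, k]) (fun x => x) = some i := by
    apply pvMinEq
    · exact (pvMemFilterMap3 _ _ _ i).mpr (Or.inr (Or.inl rfl))
    · intro y hy
      rcases (pvMemFilterMap3 _ _ _ y).mp hy with h | h | h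
      · exact Or.inr (hir y h)
      · exact Or.inl (Option.some.inj h).symm
      · exact Or.inr (hk y h)
  rw [hmin]
  show (if some i = ir then i + 9 else if some i = some i then -2 else -3) = -2
  have h1 : some i ≠ ir := by
    intro h
    exact absurd (hir i h.symm) (lt_irrefl i)
  rw [if_neg h1, if_pos rfl]

lemma pvCombine_stop (i : Int) (ir jr : Option Int)
    (hir : ∀ x, ir = some x → i < x) (hjr : ∀ x, jr = some x → i < x) :
    pvCombine ir jr (some i) = -3 := by
  unfold pvCombine
  have hmin : PySem.List.min? (List.filterMap id [ir, jr, some i]) (fun x => x) = some i := by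
    apply pvMinEq
    · exact (pvMemFilterMap3 _ _ _ i).mpr (Or.inr (Or.inr rfl))
    · intro y hy
      rcases (pvMemFilterMap3 _ _ _ y).mp hy with h | h | h
      · exact Or.inr (hir y h)
      · exact Or.inr (hjr y h)
      · exact Or.inl (Option.some.inj h).symm
  rw [hmin]
  show (if some i = ir then i + 9 else if some i = jr then -2 else -3) = -3
  have h1 : some i ≠ ir := fun h => absurd (hir i h.symm) (lt_irrefl i)
  have h2 : some i ≠ jr := fun h => absurd (hjr i h.symm) (lt_irrefl i)
  rw [if_neg h1, if_neg h2]

-- main loop lemma: A's scan equals B's combination of the three searches, over any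
-- strictly increasing list of nonnegative candidate indices
lemma pvMain (s : List Int) :
    ∀ L : List Int, (∀ i ∈ L, 0 ≤ i) → L.Pairwise (· < ·) →
      pvLoopA s L =
        pvCombine (pvFirstAtLoop s pvStart L) (pvFirstAtLoop s pvInv L)
          (pvFirstAtLoop s pvStop18 L) := by
  intro L
  induction L with
  | nil => intro _ _; rfl
  | cons i rest ih =>
    intro hpos hpw
    have hi : 0 ≤ i := hpos i List.mem_cons_self
    have hlt : ∀ x ∈ rest, i < x := (List.pairwise_cons.mp hpw).1
    have hpos' : ∀ x ∈ rest, 0 ≤ x := fun x hx => hpos x (List.mem_cons_of_mem _ hx)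
    have hpw' : rest.Pairwise (· < ·) := (List.pairwise_cons.mp hpw).2
    have hlens : i + PySem.List.len pvStart = i + 9 := by
      norm_num [PySem.List.len_eq, pvStart]
    have hleni : i + PySem.List.len pvInv = i + 9 := by
      norm_num [PySem.List.len_eq, pvInv]
    have hlenk : i + PySem.List.len pvStop18 = i + 18 := by
      norm_num [PySem.List.len_eq, pvStop18]
    have hrs : ∀ x, pvFirstAtLoop s pvStart rest = some x → i < x :=
      fun x h => hlt x (pvFirstAtLoop_mem s _ rest x h)
    have hrv : ∀ x, pvFirstAtLoop s pvInv rest = some x → i < x :=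
      fun x h => hlt x (pvFirstAtLoop_mem s _ rest x h)
    have hrk : ∀ x, pvFirstAtLoop s pvStop18 rest = some x → i < x :=
      fun x h => hlt x (pvFirstAtLoop_mem s _ rest x h)
    show (if PySem.List.slice s (some i) (some (i + 9)) = pvStart then i + 9
      else if PySem.List.slice s (some i) (some (i + 9)) = pvInv then -2
      else if PySem.List.slice s (some i) (some (i + 9)) = pvStop9 then
        (if PySem.List.slice s (some i) (some (i + 18)) = pvStop18 then -3
         else pvLoopA s rest)
      else pvLoopA s rest) = _
    simp only [pvFirstAtLoop, hlens, hleni, hlenk]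
    by_cases hs : PySem.List.slice s (some i) (some (i + 9)) = pvStart
    · have hv : PySem.List.slice s (some i) (some (i + 9)) ≠ pvInv := by
        rw [hs]; decide
      have h18 : PySem.List.slice s (some i) (some (i + 18)) ≠ pvStop18 := fun h => by
        have h9 := pvStop18_imp_stop9 s i hi h
        rw [hs] at h9; exact absurd h9 (by decide)
      rw [if_pos hs, if_pos hs, if_neg hv, if_neg h18]
      exact (pvCombine_start i _ _ hrv hrk).symm
    · rw [if_neg hs, if_neg hs]
      by_cases hv : PySem.List.slice s (some i) (some (i + 9)) = pvInv
      · have h18 : PySem.List.slice s (some i) (some (i + 18)) ≠ pvStop18 := fun h => by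
          have h9 := pvStop18_imp_stop9 s i hi h
          rw [hv] at h9; exact absurd h9 (by decide)
        rw [if_pos hv, if_pos hv, if_neg h18]
        exact (pvCombine_inv i _ _ hrs hrk).symm
      · rw [if_neg hv, if_neg hv]
        by_cases h18 : PySem.List.slice s (some i) (some (i + 18)) = pvStop18
        · have h9 : PySem.List.slice s (some i) (some (i + 9)) = pvStop9 :=
            pvStop18_imp_stop9 s i hi h18
          rw [if_pos h9, if_pos h18, if_pos h18]
          exact (pvCombine_stop i _ _ hrs hrv).symm
        · rw [if_neg h18, if_neg h18]
          have hrec := ih hpos' hpw'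
          by_cases h9 : PySem.List.slice s (some i) (some (i + 9)) = pvStop9
          · rw [if_pos h9]
            exact hrec
          · rw [if_neg h9]
            exact hrec

-- ===== VERDICT (by name: the statement is the Claim_ definition above) =====
theorem find_start_index_spec : Claim_equal_find_start_index := by
  intro samples _
  unfold Spec_find_start_index
  rw [pvAlt_eq]
  have hn : PySem.List.len samples - 9 + 1 = (samples.length : Int) - 8 := by
    simp [PySem.List.len_eq]; ring
  have hss : pvFirstAt samples pvStart =
      pvFirstAtLoop samples pvStart (PySem.List.pyRange 0 ((samples.length : Int) - 8) 1) := by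
    unfold pvFirstAt
    have : PySem.List.len samples - PySem.List.len pvStart + 1 = (samples.length : Int) - 8 := by
      simp [PySem.List.len_eq, pvStart]; ring
    rw [this]
  have hsi : pvFirstAt samples pvInv =
      pvFirstAtLoop samples pvInv (PySem.List.pyRange 0 ((samples.length : Int) - 8) 1) := by
    unfold pvFirstAt
    have : PySem.List.len samples - PySem.List.len pvInv + 1 = (samples.length : Int) - 8 := by
      simp [PySem.List.len_eq, pvInv]; ring
    rw [this]
  show find_start_index samples = _
  unfold find_start_index
  rw [hn, hss, hsi, pvStopRange]
  exact pvMain samples _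
    (fun i hi => ((PySem.List.mem_pyRange_one).mp hi).1)
    (PySem.List.pairwise_lt_pyRange_one 0 _)
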